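-- pv_equiv track=rewrite | github.com/XD-Builder/interview-notes | interviewing/algorithm_solutions/parts-sum.py | minimumCombineParts
-- ===== SOURCE A (Python) =====
-- import bisect
--
-- def minimumCombineParts(parts):
--     if len(parts) < 2:
--         return 0
--
--     sortedParts = sorted(parts.copy())
--
--     partsSum = 0
--     for i in range (1, len(sortedParts)):
--         partsMerge = sum(sortedParts[0:2])
--         partsSum += partsMerge
--         del sortedParts[0:2]
--         bisect.insort(sortedParts, partsMerge)
--
--     return partsSum
-- ===== SOURCE B (Python) =====
-- def _make(v, left, right):
--     # leftist node: keep the larger-rank child on the left; rank = 1 + right child's rank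
--     lr = 0 if left is None else left[0]
--     rr = 0 if right is None else right[0]
--     if lr < rr:
--         return (lr + 1, v, right, left)
--     return (rr + 1, v, left, right)
--
--
-- def _meld(h1, h2):
--     # leftist min-heap merge; heap = None | (rank, value, left, right)
--     if h1 is None:
--         return h2
--     if h2 is None:
--         return h1
--     if h2[1] < h1[1]:
--         return _make(h2[1], h2[2], _meld(h2[3], h1))
--     return _make(h1[1], h1[2], _meld(h1[3], h2))
--
--
-- def minimumCombineParts(parts):
--     if len(parts) < 2:
--         return 0
--     heap = None
--     for p in parts:
--         heap = _meld((1, p, None, None), heap)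
--     total = 0
--     for _ in range(len(parts) - 1):
--         _, a, l1, r1 = heap
--         heap = _meld(l1, r1)
--         _, b, l2, r2 = heap
--         heap = _meld(l2, r2)
--         s = a + b
--         total += s
--         heap = _meld((1, s, None, None), heap)
--     return total
-- ===== Notes on version B (the rewrite author's own statement) =====
-- stated objective: faster
-- what changed: Replaces A's quadratic loop over a sorted list (sum and delete the first two, then bisect.insort the merged value) with a hand-written leftist min-heap built directly from the input, popping the two minima and pushing their sum each round.
import Mathlib
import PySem

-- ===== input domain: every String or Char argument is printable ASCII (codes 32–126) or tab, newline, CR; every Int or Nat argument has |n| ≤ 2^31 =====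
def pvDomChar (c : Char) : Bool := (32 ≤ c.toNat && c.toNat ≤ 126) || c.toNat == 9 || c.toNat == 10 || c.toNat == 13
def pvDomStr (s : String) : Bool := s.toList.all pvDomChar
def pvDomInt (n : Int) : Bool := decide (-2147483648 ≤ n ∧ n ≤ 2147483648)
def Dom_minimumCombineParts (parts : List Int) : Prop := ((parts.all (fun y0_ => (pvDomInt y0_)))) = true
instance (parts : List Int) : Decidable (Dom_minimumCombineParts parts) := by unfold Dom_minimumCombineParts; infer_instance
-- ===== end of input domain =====

-- B replaces A's quadratic sorted-list loop (sum/del of the first two + bisect.insort each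
-- round) by a hand-written leftist min-heap built directly from the input (asymptotically
-- faster as measured; A does not observably mutate its argument: it copies before sorting).

-- ===== PORT A =====
-- bisect.insort(sortedParts, partsMerge): insert at the bisect_right insertion point
def insortA (xs : List Int) (x : Int) : List Int :=
  let j := PySem.List.bisectRight xs x
  xs.take j ++ x :: xs.drop j

-- one iteration of A's for-body over the state (sortedParts, partsSum); the loop index is unused
def stepA (st : List Int × Int) : List Int × Int :=
  let partsMerge := (PySem.List.slice st.1 (some 0) (some 2)).sum
  (insortA (PySem.List.slice st.1 (some 2) none) partsMerge, st.2 + partsMerge)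

def minimumCombineParts (parts : List Int) : Int :=
  if parts.length < 2 then 0
  else
    let sortedParts := PySem.List.sorted parts (fun x => x) false
    ((PySem.List.pyRange 1 (PySem.List.len sortedParts) 1).foldl
        (fun st _ => stepA st) (sortedParts, 0)).2

-- ===== PORT B =====
-- leftist min-heap: nil | node rank value left right  (Python: None | (rank, value, left, right))
inductive LHeap
  | nil : LHeap
  | node : Int → Int → LHeap → LHeap → LHeap
deriving DecidableEq, Repr

def LHeap.rank : LHeap → Int
  | .nil => 0
  | .node r _ _ _ => r

-- structural size, used only for meld's termination measure
def LHeap.size : LHeap → Nat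
  | .nil => 0
  | .node _ _ l r => l.size + r.size + 1

-- _make(v, left, right): larger-rank child goes left; rank = right child's rank + 1
def mkNode (v : Int) (l r : LHeap) : LHeap :=
  if l.rank < r.rank then .node (l.rank + 1) v r l
  else .node (r.rank + 1) v l r

-- _meld(h1, h2)
def meld : LHeap → LHeap → LHeap
  | .nil, h2 => h2
  | .node r v l rr, .nil => .node r v l rr
  | .node r1 v1 l1 rr1, .node r2 v2 l2 rr2 =>
    if v2 < v1 then mkNode v2 l2 (meld rr2 (.node r1 v1 l1 rr1))
    else mkNode v1 l1 (meld rr1 (.node r2 v2 l2 rr2))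
termination_by h1 h2 => h1.size + h2.size
decreasing_by all_goals (simp only [LHeap.size]; omega)

-- B's second for-loop; fuel = len(parts) - 1 remaining merges (the .nil cases are unreachable there)
def loopB : Nat → LHeap → Int → Int
  | 0, _, tot => tot
  | Nat.succ k, h, tot =>
    match h with
    | .nil => tot
    | .node _ a l1 r1 =>
      match meld l1 r1 with
      | .nil => tot
      | .node _ b l2 r2 =>
        loopB k (meld (.node 1 (a + b) .nil .nil) (meld l2 r2)) (tot + (a + b))

def minimumCombineParts_alt (parts : List Int) : Int :=
  if parts.length < 2 then 0
  else
    loopB (parts.length - 1)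
      (parts.foldl (fun h p => meld (.node 1 p .nil .nil) h) .nil) 0

-- ===== PRECONDITION & SPEC =====
def Spec_minimumCombineParts (parts : List Int) (out : Int) : Prop := out = minimumCombineParts_alt parts
instance (parts : List Int) (out : Int) : Decidable (Spec_minimumCombineParts parts out) := by unfold Spec_minimumCombineParts; infer_instance

-- ===== CLAIM (what is proved, stated in full; the proofs are below) =====
def Claim_equal_minimumCombineParts : Prop := ∀ (parts : List Int), Dom_minimumCombineParts parts → Spec_minimumCombineParts parts (minimumCombineParts parts)

-- ===== LEMMAS AND PROOFS =====

-- the multiset of values stored in a heap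
def toMS : LHeap → Multiset Int
  | .nil => 0
  | .node _ v l r => v ::ₘ (toMS l + toMS r)

-- the min-heap property
def IsHeap : LHeap → Prop
  | .nil => True
  | .node _ v l r => (∀ x ∈ toMS l, v ≤ x) ∧ (∀ x ∈ toMS r, v ≤ x) ∧ IsHeap l ∧ IsHeap r

lemma toMS_mkNode (v : Int) (l r : LHeap) : toMS (mkNode v l r) = v ::ₘ (toMS l + toMS r) := by
  unfold mkNode; split <;> simp [toMS] <;> abel

lemma isHeap_mkNode {v : Int} {l r : LHeap} (hl : ∀ x ∈ toMS l, v ≤ x) (hr : ∀ x ∈ toMS r, v ≤ x)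
    (hhl : IsHeap l) (hhr : IsHeap r) : IsHeap (mkNode v l r) := by
  unfold mkNode; split <;> exact ⟨by assumption, by assumption, by assumption, by assumption⟩

lemma toMS_meld (a b : LHeap) : toMS (meld a b) = toMS a + toMS b := by
  fun_induction meld a b with
  | case1 => simp [toMS]
  | case2 => simp [toMS]
  | case3 r1 v1 l1 rr1 r2 v2 l2 rr2 hlt ih => rw [toMS_mkNode, ih]; simp [toMS, ← Multiset.singleton_add]; abel
  | case4 r1 v1 l1 rr1 r2 v2 l2 rr2 hlt ih => rw [toMS_mkNode, ih]; simp [toMS, ← Multiset.singleton_add]; abel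

lemma isHeap_root_le {r v : Int} {l rr : LHeap} (h : IsHeap (.node r v l rr)) :
    ∀ x ∈ toMS (.node r v l rr), v ≤ x := by
  obtain ⟨hl, hr, _, _⟩ := h
  intro x hx
  simp [toMS] at hx
  rcases hx with h | h | h
  · omega
  · exact hl x h
  · exact hr x h

lemma isHeap_meld (a b : LHeap) (ha : IsHeap a) (hb : IsHeap b) : IsHeap (meld a b) := by
  fun_induction meld a b with
  | case1 => exact hb
  | case2 => exact ha
  | case3 r1 v1 l1 rr1 r2 v2 l2 rr2 hlt ih =>
    obtain ⟨h2l, h2r, h2hl, h2hr⟩ := hb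
    refine isHeap_mkNode h2l ?_ h2hl (ih h2hr ha)
    intro x hx
    rw [toMS_meld] at hx
    rcases Multiset.mem_add.mp hx with hx | hx
    · exact h2r x hx
    · exact le_trans (le_of_lt hlt) (isHeap_root_le ha x hx)
  | case4 r1 v1 l1 rr1 r2 v2 l2 rr2 hlt ih =>
    obtain ⟨h1l, h1r, h1hl, h1hr⟩ := ha
    refine isHeap_mkNode h1l ?_ h1hl (ih h1hr hb)
    intro x hx
    rw [toMS_meld] at hx
    rcases Multiset.mem_add.mp hx with hx | hx
    · exact h1r x hx
    · exact le_trans (by omega) (isHeap_root_le hb x hx)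

lemma isHeap_single (p : Int) : IsHeap (LHeap.node 1 p .nil .nil) := by
  simp [IsHeap, toMS]

lemma insortA_perm (xs : List Int) (x : Int) : (insortA xs x).Perm (x :: xs) := by
  unfold insortA
  exact List.perm_middle.trans (by rw [List.take_append_drop])

lemma insortA_sorted {xs : List Int} (hs : xs.Pairwise (· ≤ ·)) (x : Int) :
    (insortA xs x).Pairwise (· ≤ ·) := by
  obtain ⟨hj, hle, hgt⟩ := PySem.List.bisectRight_spec xs x hs
  unfold insortA
  rw [List.pairwise_append]
  refine ⟨hs.sublist (List.take_sublist _ _), ?_, ?_⟩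
  · rw [List.pairwise_cons]
    refine ⟨?_, hs.sublist (List.drop_sublist _ _)⟩
    intro y hy
    obtain ⟨i, hi, rfl⟩ := List.mem_iff_getElem.mp hy
    rw [List.getElem_drop]
    have hlen : PySem.List.bisectRight xs x + i < xs.length := by
      have := List.length_drop (l := xs) (i := PySem.List.bisectRight xs x); omega
    exact le_of_lt (hgt _ hlen (by omega))
  · intro u hu w hw
    obtain ⟨i, hi, rfl⟩ := List.mem_iff_getElem.mp hu
    rw [List.length_take] at hi
    have hux : (List.take (PySem.List.bisectRight xs x) xs)[i]'(by rw [List.length_take]; omega) ≤ x := by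
      rw [List.getElem_take]
      exact hle i (by omega) (by omega)
    rcases List.mem_cons.mp hw with rfl | hw
    · exact hux
    · obtain ⟨i2, hi2, rfl⟩ := List.mem_iff_getElem.mp hw
      have hlen : PySem.List.bisectRight xs x + i2 < xs.length := by
        have := List.length_drop (l := xs) (i := PySem.List.bisectRight xs x); omega
      refine le_trans hux (le_of_lt ?_)
      rw [List.getElem_drop]
      exact hgt _ hlen (by omega)

lemma build_heap_aux (parts : List Int) : ∀ acc : LHeap, IsHeap acc →
    IsHeap (parts.foldl (fun h p => meld (.node 1 p .nil .nil) h) acc) ∧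
    toMS (parts.foldl (fun h p => meld (.node 1 p .nil .nil) h) acc) = toMS acc + (parts : Multiset Int) := by
  induction parts with
  | nil => intro acc hacc; exact ⟨hacc, by simp⟩
  | cons p ps ih =>
    intro acc hacc
    simp only [List.foldl_cons]
    have hsingle : IsHeap (LHeap.node 1 p .nil .nil) := isHeap_single p
    obtain ⟨h1, h2⟩ := ih (meld (.node 1 p .nil .nil) acc) (isHeap_meld _ _ hsingle hacc)
    refine ⟨h1, ?_⟩
    rw [h2, toMS_meld]
    simp [toMS, ← Multiset.cons_coe, ← Multiset.singleton_add]
    abel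

lemma foldl_const {α β : Type} (f : α → α) (l : List β) (init : α) :
    l.foldl (fun s _ => f s) init = f^[l.length] init := by
  induction l generalizing init with
  | nil => rfl
  | cons b l ih => simp [List.foldl_cons, ih, Function.iterate_succ_apply]

-- main invariant: A's sorted list and B's heap hold the same multiset, so every round both
-- merge the same two minimal values and accumulate the same total
lemma loop_eq : ∀ (k : Nat) (xs : List Int) (h : LHeap) (tot : Int),
    xs.Pairwise (· ≤ ·) → IsHeap h → (xs : Multiset Int) = toMS h → xs.length = k + 1 →
    (stepA^[k] (xs, tot)).2 = loopB k h tot := by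
  intro k
  induction k with
  | zero => intro xs h tot _ _ _ _; simp [loopB]
  | succ k ih =>
    intro xs h tot hsort hheap hms hlen
    match xs with
    | a :: b :: rest =>
    -- A's step
    have hstep : stepA (a :: b :: rest, tot) = (insortA rest (a + b), tot + (a + b)) := by
      simp [stepA, PySem.List.slice, PySem.List.clampIdx]
    -- B's heap is nonempty, with root = a
    match h with
    | .nil => exfalso; simp [toMS] at hms
    | .node r v l rr =>
    have hmin : ∀ y ∈ a :: b :: rest, a ≤ y := by
      intro y hy
      rcases List.mem_cons.mp hy with rfl | hy
      · exact le_refl _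
      · exact List.rel_of_pairwise_cons hsort hy
    have hva : v = a := by
      have h1 : a ≤ v := hmin v (by
        have : v ∈ toMS (LHeap.node r v l rr) := by simp [toMS]
        rw [← hms] at this; exact_mod_cast this)
      have h2 : v ≤ a := isHeap_root_le hheap a (by rw [← hms]; simp)
      omega
    subst hva
    have hms2 : (b ::ₘ (rest : Multiset Int)) = toMS (meld l rr) := by
      rw [toMS_meld]
      have h' := hms
      simp only [toMS, ← Multiset.cons_coe] at h'
      exact (Multiset.cons_inj_right _).mp h'
    have hheap2 : IsHeap (meld l rr) := isHeap_meld _ _ hheap.2.2.1 hheap.2.2.2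
    match hm2 : meld l rr with
    | .nil => exfalso; rw [hm2] at hms2; simp [toMS] at hms2
    | .node r2 w l2 rr2 =>
    rw [hm2] at hms2 hheap2
    have hminb : ∀ y ∈ b :: rest, b ≤ y := by
      intro y hy
      rcases List.mem_cons.mp hy with rfl | hy
      · exact le_refl _
      · exact List.rel_of_pairwise_cons (List.pairwise_cons.mp hsort).2 hy
    have hwb : w = b := by
      have h1 : b ≤ w := hminb w (by
        have hmem : w ∈ toMS (LHeap.node r2 w l2 rr2) := by simp [toMS]
        rw [← hms2] at hmem
        rcases Multiset.mem_cons.mp hmem with h | h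
        · simp [h]
        · exact List.mem_cons_of_mem _ (by exact_mod_cast h))
      have h2 : w ≤ b := isHeap_root_le hheap2 b (by rw [← hms2]; simp)
      omega
    subst hwb
    have hms3 : ((rest : List Int) : Multiset Int) = toMS l2 + toMS rr2 := by
      simp only [toMS] at hms2
      exact (Multiset.cons_inj_right _).mp hms2
    -- loopB unfolds
    have hloop : loopB (k + 1) (LHeap.node r v l rr) tot
        = loopB k (meld (.node 1 (v + w) .nil .nil) (meld l2 rr2)) (tot + (v + w)) := by
      simp only [loopB]
      rw [hm2]
    rw [Function.iterate_succ_apply, hstep, hloop]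
    -- apply IH
    refine ih (insortA rest (v + w)) _ _ (insortA_sorted (List.pairwise_cons.mp (List.pairwise_cons.mp hsort).2).2 _) ?_ ?_ ?_
    · refine isHeap_meld _ _ ?_ (isHeap_meld _ _ hheap2.2.2.1 hheap2.2.2.2)
      refine ⟨?_, ?_, trivial, trivial⟩ <;> simp [toMS]
    · have hperm := insortA_perm rest (v + w)
      calc ((insortA rest (v + w) : List Int) : Multiset Int)
          = (((v + w) :: rest : List Int) : Multiset Int) := Multiset.coe_eq_coe.mpr hperm
        _ = (v + w) ::ₘ (rest : Multiset Int) := by simp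
        _ = _ := by rw [toMS_meld, toMS_meld, hms3]; simp [toMS]
    · have hl2 : (insortA rest (v + w)).length = rest.length + 1 := by
        have := (insortA_perm rest (v + w)).length_eq; simpa using this
      simp at hlen; omega

theorem main_eq (parts : List Int) : minimumCombineParts parts = minimumCombineParts_alt parts := by
  unfold minimumCombineParts minimumCombineParts_alt
  by_cases hlt : parts.length < 2
  · simp [hlt]
  · simp only [if_neg hlt]
    have hn : 2 ≤ parts.length := by omega
    have hlen : (PySem.List.sorted parts (fun x => x) false).length = parts.length :=
      (PySem.List.sorted_perm parts (fun x => x) false).length_eq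
    rw [foldl_const, PySem.List.length_pyRange_one]
    have hcast : ((PySem.List.len (PySem.List.sorted parts (fun x => x) false)) - 1).toNat
        = parts.length - 1 := by
      simp [PySem.List.len_eq, hlen]
    rw [hcast]
    obtain ⟨hh, hm⟩ := build_heap_aux parts .nil trivial
    refine loop_eq (parts.length - 1) _ _ 0 ?_ hh ?_ ?_
    · simpa using PySem.List.sorted_pairwise parts (fun x => x)
    · rw [hm]
      simp [toMS]
      exact PySem.List.sorted_perm parts (fun x => x) false
    · omega

-- ===== VERDICT (by name: the statement is the Claim_ definition above) =====
theorem minimumCombineParts_spec : Claim_equal_minimumCombineParts := by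
  intro parts _
  unfold Spec_minimumCombineParts
  exact main_eq parts
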